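-- pv_equiv track=rewrite | github.com/Gab0/auto-gromacs | autogromacs/mdp_control.py | compact_parameter_list
-- ===== SOURCE A (Python) =====
-- def compact_parameter_list(parameters):
--     compat = {}
--
--     def make_key(parameter, value):
--         return f"{parameter}:{value}"
--
--     for stage, parameter, value in parameters:
--         K = make_key(parameter, value)
--         if K not in compat.keys():
--             compat[K] = []
--         compat[K].append(stage)
--
--     output_parameters = []
--     for stage, parameter, value in parameters:
--         K = make_key(parameter, value)
--         if K in compat.keys():
--             stages = compat[K]
--             message = "+".join(stages)
--             output_parameters.append([message, parameter, value])
--             del compat[K]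
--
--     return output_parameters
-- ===== SOURCE B (Python) =====
-- def compact_parameter_list(parameters):
--     groups = {}
--     for stage, parameter, value in parameters:
--         K = f"{parameter}:{value}"
--         if K in groups:
--             groups[K][2].append(stage)
--         else:
--             groups[K] = (parameter, value, [stage])
--     return [["+".join(stages), parameter, value]
--             for parameter, value, stages in groups.values()]
-- ===== Notes on version B (the rewrite author's own statement) =====
-- stated objective: simpler
-- what changed: B replaces A's two scans of parameters (group pass + re-scan with emit-and-delete) by a single grouping pass into an insertion-ordered dict keyed by 'parameter:value' storing (parameter, value, stages), followed by one pass over the dict's values.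
import Mathlib
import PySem

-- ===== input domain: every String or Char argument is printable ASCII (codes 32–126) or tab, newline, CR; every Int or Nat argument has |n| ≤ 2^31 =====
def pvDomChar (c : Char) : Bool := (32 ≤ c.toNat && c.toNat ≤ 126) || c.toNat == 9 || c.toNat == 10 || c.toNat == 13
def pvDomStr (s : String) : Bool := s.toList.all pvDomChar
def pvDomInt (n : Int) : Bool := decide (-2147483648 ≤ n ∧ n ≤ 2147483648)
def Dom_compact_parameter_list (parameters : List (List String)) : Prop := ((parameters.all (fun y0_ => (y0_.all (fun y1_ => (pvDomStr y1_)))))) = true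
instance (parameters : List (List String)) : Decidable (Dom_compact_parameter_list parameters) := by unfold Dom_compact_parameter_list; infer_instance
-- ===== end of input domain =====

-- B groups in ONE pass over `parameters` into an insertion-ordered dict keyed by
-- "parameter:value" holding (parameter, value, stages), then emits the dict's values,
-- instead of A's two scans with the emit-then-delete trick. Objective: simpler.

-- ===== PORT A =====
-- helper `make_key` of A
def pvMakeKey (parameter value : String) : String := parameter ++ ":" ++ value

-- body of A's first loop (groups stages under the key)
def pvGroupA (compat : PySem.Dict String (List String)) (row : List String) :
    PySem.Dict String (List String) :=
  match row with
  | [stage, parameter, value] =>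
      compat.modify (pvMakeKey parameter value) [] (fun st => st ++ [stage])
  | _ => compat

-- body of A's second loop (emit at still-present key, then delete it)
def pvLoopA (st : PySem.Dict String (List String) × List (List String)) (row : List String) :
    PySem.Dict String (List String) × List (List String) :=
  match row with
  | [_stage, parameter, value] =>
      let K := pvMakeKey parameter value
      if st.1.contains K then
        (st.1.erase K, st.2 ++ [[PySem.Str.join "+" (st.1.getD K []), parameter, value]])
      else st
  | _ => st

def compact_parameter_list (parameters : List (List String)) : List (List String) :=
  let compat := parameters.foldl pvGroupA PySem.Dict.empty
  (parameters.foldl pvLoopA (compat, [])).2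

-- ===== PORT B =====
-- body of B's single grouping loop
def pvGroupB (groups : PySem.Dict String (String × String × List String)) (row : List String) :
    PySem.Dict String (String × String × List String) :=
  match row with
  | [stage, parameter, value] =>
      let K := parameter ++ ":" ++ value
      if groups.contains K then
        groups.modify K ("", "", []) (fun t => (t.1, t.2.1, t.2.2 ++ [stage]))
      else
        groups.insert K (parameter, value, [stage])
  | _ => groups

def compact_parameter_list_alt (parameters : List (List String)) : List (List String) :=
  let groups := parameters.foldl pvGroupB PySem.Dict.empty
  groups.values.map (fun t => [PySem.Str.join "+" t.2.2, t.1, t.2.1])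

-- ===== PRECONDITION & SPEC =====
-- Pre_ excludes exactly the rows on which Python A raises ValueError: a row that is not
-- a [stage, parameter, value] triple fails tuple unpacking in A (and in B alike).
def Pre_compact_parameter_list (parameters : List (List String)) : Prop :=
  ∀ row ∈ parameters, row.length = 3
instance (parameters : List (List String)) : Decidable (Pre_compact_parameter_list parameters) := by
  unfold Pre_compact_parameter_list; infer_instance

def pvWitness_compact_parameter_list : List (List String) :=
  [["min", "dt", "0.002"], ["eq", "dt", "0.002"], ["eq", "nsteps", "5000"]]

def Spec_compact_parameter_list (parameters : List (List String)) (out : List (List String)) : Prop := out = compact_parameter_list_alt parameters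
instance (parameters : List (List String)) (out : List (List String)) : Decidable (Spec_compact_parameter_list parameters out) := by unfold Spec_compact_parameter_list; infer_instance

-- ===== CLAIM (what is proved, stated in full; the proofs are below) =====
def Claim_equal_compact_parameter_list : Prop := ∀ (parameters : List (List String)), Dom_compact_parameter_list parameters → Pre_compact_parameter_list parameters → Spec_compact_parameter_list parameters (compact_parameter_list parameters)

-- ===== LEMMAS AND PROOFS =====

-- key of a (length-3) row
def pvKeyOf (row : List String) : String := row.getD 1 "" ++ ":" ++ row.getD 2 ""

-- keys of the rows in first-occurrence order
def pvFirstKeys : List (List String) → List String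
  | [] => []
  | r :: rs => pvKeyOf r :: (pvFirstKeys rs).filter (fun k => k ≠ pvKeyOf r)

-- (parameter, value) of the first row carrying key k
def pvFirstPV : List (List String) → String → Option (String × String)
  | [], _ => none
  | r :: rs, k => if pvKeyOf r = k then some (r.getD 1 "", r.getD 2 "") else pvFirstPV rs k

-- forget the (parameter, value) components of B's entries
def pvStrip (l : List (String × (String × String × List String))) :
    List (String × List String) := l.map (fun q => (q.1, q.2.2.2))

def pvEmit (t : String × String × List String) : List String :=
  [PySem.Str.join "+" t.2.2, t.1, t.2.1]

lemma pvFirstKeys_nodup (rows : List (List String)) : (pvFirstKeys rows).Nodup := by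
  induction rows with
  | nil => simp [pvFirstKeys]
  | cons r rs ih =>
      simp only [pvFirstKeys, List.nodup_cons]
      refine ⟨fun h => ?_, ih.filter _⟩
      · have := List.of_mem_filter h
        simp at this
  
lemma pvStrip_get? (c : PySem.Dict String (List String))
    (g : PySem.Dict String (String × String × List String))
    (h : c.items = pvStrip g.items) (x : String) :
    c.get? x = (g.get? x).map (fun t => t.2.2) := by
  unfold PySem.Dict.get?
  rw [h]
  unfold pvStrip
  rw [List.find?_map, Option.map_map, Option.map_map]
  rfl

lemma pvStrip_contains (c : PySem.Dict String (List String))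
    (g : PySem.Dict String (String × String × List String))
    (h : c.items = pvStrip g.items) (x : String) :
    c.contains x = g.contains x := by
  rw [PySem.Dict.contains_eq_isSome_get?, PySem.Dict.contains_eq_isSome_get?,
    pvStrip_get? c g h, Option.isSome_map]

lemma pvGroupAB_items (rows : List (List String))
    (c : PySem.Dict String (List String)) (g : PySem.Dict String (String × String × List String))
    (hlen : ∀ r ∈ rows, r.length = 3)
    (h : c.items = pvStrip g.items) :
    (rows.foldl pvGroupA c).items = pvStrip (rows.foldl pvGroupB g).items := by
  induction rows generalizing c g with
  | nil => simpa using h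
  | cons r rs ih =>
      obtain ⟨s, p, v, rfl⟩ := List.length_eq_three.mp (hlen r List.mem_cons_self)
      have hlen' : ∀ r ∈ rs, r.length = 3 := fun r hr => hlen r (List.mem_cons_of_mem _ hr)
      rw [List.foldl_cons, List.foldl_cons]
      refine ih _ _ hlen' ?_
      have hcg : c.contains (p ++ ":" ++ v) = g.contains (p ++ ":" ++ v) :=
        pvStrip_contains c g h _
      by_cases hg : g.contains (p ++ ":" ++ v)
      · have hcK : c.contains (p ++ ":" ++ v) = true := by rw [hcg, hg]
        obtain ⟨t0, ht0⟩ : ∃ t0, g.get? (p ++ ":" ++ v) = some t0 := by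
          have := PySem.Dict.contains_eq_isSome_get? g (p ++ ":" ++ v)
          rw [hg] at this
          exact Option.isSome_iff_exists.mp this.symm
        have hgetDg : g.getD (p ++ ":" ++ v) ("", "", []) = t0 :=
          PySem.Dict.getD_of_get?_eq_some _ _ ht0
        have hgetDc : c.getD (p ++ ":" ++ v) [] = t0.2.2 := by
          unfold PySem.Dict.getD
          rw [pvStrip_get? c g h, ht0]
          rfl
        show (c.modify _ _ _).items = pvStrip (pvGroupB g [s, p, v]).items
        have hstepB : pvGroupB g [s, p, v]
            = g.insert (p ++ ":" ++ v) (t0.1, t0.2.1, t0.2.2 ++ [s]) := by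
          simp [pvGroupB, hg, PySem.Dict.modify, hgetDg]
        have hstepA : c.modify (pvMakeKey p v) [] (fun st => st ++ [s])
            = c.insert (p ++ ":" ++ v) (t0.2.2 ++ [s]) := by
          simp [PySem.Dict.modify, pvMakeKey, hgetDc]
        rw [hstepA, hstepB, PySem.Dict.items_insert_of_contains _ _ hcK,
          PySem.Dict.items_insert_of_contains _ _ hg, h]
        unfold pvStrip
        rw [List.map_map, List.map_map]
        apply List.map_congr_left
        intro q _
        by_cases hq : q.1 = p ++ ":" ++ v
        · simp [hq]
        · simp [hq]
      · have hcK : c.contains (p ++ ":" ++ v) = false := by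
          rw [hcg]; simpa using hg
        have hgetDc : c.getD (p ++ ":" ++ v) [] = [] :=
          PySem.Dict.getD_of_not_contains _ _ hcK
        show (c.modify _ _ _).items = pvStrip (pvGroupB g [s, p, v]).items
        have hstepB : pvGroupB g [s, p, v] = g.insert (p ++ ":" ++ v) (p, v, [s]) := by
          simp [pvGroupB, hg]
        have hstepA : c.modify (pvMakeKey p v) [] (fun st => st ++ [s])
            = c.insert (p ++ ":" ++ v) [s] := by
          simp [PySem.Dict.modify, pvMakeKey, hgetDc]
        rw [hstepA, hstepB,
          PySem.Dict.items_insert_of_not_contains _ _ hcK,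
          PySem.Dict.items_insert_of_not_contains _ _ (by simpa using hg), h]
        unfold pvStrip
        simp

lemma pvGroupB_keys (rows : List (List String))
    (g : PySem.Dict String (String × String × List String))
    (hlen : ∀ r ∈ rows, r.length = 3) :
    (rows.foldl pvGroupB g).keys
      = g.keys ++ (pvFirstKeys rows).filter (fun k => !(g.contains k)) := by
  induction rows generalizing g with
  | nil => simp [pvFirstKeys]
  | cons r rs ih =>
      obtain ⟨s, p, v, rfl⟩ := List.length_eq_three.mp (hlen r List.mem_cons_self)
      have hlen' : ∀ r ∈ rs, r.length = 3 := fun r hr => hlen r (List.mem_cons_of_mem _ hr)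
      have hkey : pvKeyOf [s, p, v] = p ++ ":" ++ v := rfl
      rw [List.foldl_cons]
      by_cases hg : g.contains (p ++ ":" ++ v)
      · have hstep : pvGroupB g [s, p, v]
            = g.modify (p ++ ":" ++ v) ("", "", []) (fun t => (t.1, t.2.1, t.2.2 ++ [s])) := by
          simp [pvGroupB, hg]
        rw [hstep, ih _ hlen', PySem.Dict.keys_modify, PySem.Dict.keys_insert_of_contains _ _ hg]
        simp only [pvFirstKeys, hkey, List.filter_cons, hg, Bool.not_true,
          List.filter_filter]
        congr 1
        apply List.filter_congr
        intro x _
        by_cases hx : x = p ++ ":" ++ v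
        · subst hx
          simp [PySem.Dict.contains_modify, hg]
        · simp [PySem.Dict.contains_modify, hx]
      · have hstep : pvGroupB g [s, p, v]
            = g.insert (p ++ ":" ++ v) (p, v, [s]) := by
          simp [pvGroupB, hg]
        rw [hstep, ih _ hlen',
          PySem.Dict.keys_insert_of_not_contains _ _ (by simpa using hg)]
        simp only [pvFirstKeys, hkey, List.filter_cons, hg, Bool.not_false, if_true,
          List.filter_filter, List.append_assoc, List.singleton_append]
        congr 2
        apply List.filter_congr
        intro x _
        by_cases hx : x = p ++ ":" ++ v
        · subst hx
          simp [hg]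
        · simp [PySem.Dict.contains_insert, hx]

lemma pvGroupB_pv (rows : List (List String))
    (g : PySem.Dict String (String × String × List String))
    (hlen : ∀ r ∈ rows, r.length = 3)
    (k p v : String) (st : List String)
    (hmem : (k, (p, v, st)) ∈ (rows.foldl pvGroupB g).items) :
    (∃ st', (k, (p, v, st')) ∈ g.items) ∨
      (g.contains k = false ∧ pvFirstPV rows k = some (p, v)) := by
  induction rows generalizing g with
  | nil => exact Or.inl ⟨st, by simpa using hmem⟩
  | cons r rs ih =>
      obtain ⟨s, p0, v0, rfl⟩ := List.length_eq_three.mp (hlen r List.mem_cons_self)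
      have hlen' : ∀ r ∈ rs, r.length = 3 := fun r hr => hlen r (List.mem_cons_of_mem _ hr)
      rw [List.foldl_cons] at hmem
      by_cases hg : g.contains (p0 ++ ":" ++ v0)
      · have hstep : pvGroupB g [s, p0, v0]
            = g.modify (p0 ++ ":" ++ v0) ("", "", []) (fun t => (t.1, t.2.1, t.2.2 ++ [s])) := by
          simp [pvGroupB, hg]
        rw [hstep] at hmem
        rcases ih _ hlen' hmem with ⟨st', h⟩ | ⟨hc, h⟩
        · have hmod : g.modify (p0 ++ ":" ++ v0) ("", "", []) (fun t => (t.1, t.2.1, t.2.2 ++ [s]))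
              = g.insert (p0 ++ ":" ++ v0)
                  (let t := g.getD (p0 ++ ":" ++ v0) ("", "", []); (t.1, t.2.1, t.2.2 ++ [s])) := rfl
          rw [hmod, PySem.Dict.items_insert_of_contains _ _ hg] at h
          obtain ⟨q, hq, he⟩ := List.mem_map.mp h
          by_cases hqk : (q.1 == (p0 ++ ":" ++ v0)) = true
          · rw [if_pos hqk] at he
            -- the replaced entry: k is the key, (p, v) are the stored parameter/value
            obtain ⟨t0, ht0⟩ : ∃ t0, g.get? (p0 ++ ":" ++ v0) = some t0 := by
              have := PySem.Dict.contains_eq_isSome_get? g (p0 ++ ":" ++ v0)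
              rw [hg] at this
              exact Option.isSome_iff_exists.mp this.symm
            have hgetD : g.getD (p0 ++ ":" ++ v0) ("", "", []) = t0 :=
              PySem.Dict.getD_of_get?_eq_some _ _ ht0
            have hk : k = p0 ++ ":" ++ v0 := by
              have := congrArg Prod.fst he; simpa using this.symm
            have hp : p = t0.1 := by
              have := congrArg (fun q => q.2.1) he; simp [hgetD] at this; exact this.symm
            have hv : v = t0.2.1 := by
              have := congrArg (fun q => q.2.2.1) he; simp [hgetD] at this; exact this.symm
            refine Or.inl ⟨t0.2.2, ?_⟩
            rw [hk, hp, hv]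
            simpa using PySem.Dict.mem_items_of_get?_eq_some g ht0
          · rw [if_neg hqk] at he
            exact Or.inl ⟨st', he ▸ hq⟩
        · have hck : g.contains k = false ∧ ¬ (k = p0 ++ ":" ++ v0) := by
            rw [PySem.Dict.contains_modify] at hc
            constructor
            · exact (Bool.or_eq_false_iff.mp hc).2
            · intro hk
              have := (Bool.or_eq_false_iff.mp hc).1
              simp [hk] at this
          refine Or.inr ⟨hck.1, ?_⟩
          have : pvKeyOf [s, p0, v0] ≠ k := fun hh => hck.2 (by simpa [pvKeyOf] using hh.symm)
          simpa [pvFirstPV, this] using h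
      · have hstep : pvGroupB g [s, p0, v0]
            = g.insert (p0 ++ ":" ++ v0) (p0, v0, [s]) := by
          simp [pvGroupB, hg]
        rw [hstep] at hmem
        rcases ih _ hlen' hmem with ⟨st', h⟩ | ⟨hc, h⟩
        · rw [PySem.Dict.items_insert_of_not_contains _ _ (by simpa using hg)] at h
          rcases List.mem_append.mp h with h' | h'
          · exact Or.inl ⟨st', h'⟩
          · -- the freshly inserted entry: its (p, v) come from this first row
            have he : k = p0 ++ ":" ++ v0 ∧ p = p0 ∧ v = v0 := by
              have := List.mem_singleton.mp h'
              simp only [Prod.mk.injEq] at this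
              exact ⟨this.1, this.2.1, this.2.2.1⟩
            refine Or.inr ⟨by rw [he.1]; simpa using hg, ?_⟩
            have : pvKeyOf [s, p0, v0] = k := by simp [pvKeyOf, he.1]
            simp [pvFirstPV, this, he.2.1, he.2.2]
        · have hck : g.contains k = false ∧ ¬ (k = p0 ++ ":" ++ v0) := by
            rw [PySem.Dict.contains_insert] at hc
            constructor
            · exact (Bool.or_eq_false_iff.mp hc).2
            · intro hk
              have := (Bool.or_eq_false_iff.mp hc).1
              simp [hk] at this
          refine Or.inr ⟨hck.1, ?_⟩
          have : pvKeyOf [s, p0, v0] ≠ k := fun hh => hck.2 (by simpa [pvKeyOf] using hh.symm)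
          simpa [pvFirstPV, this] using h

lemma pvLoopA_eq (rows : List (List String))
    (c : PySem.Dict String (List String)) (g : PySem.Dict String (String × String × List String))
    (acc : List (List String))
    (hlen : ∀ r ∈ rows, r.length = 3)
    (hc : c.items = pvStrip g.items)
    (hord : g.keys = (pvFirstKeys rows).filter (fun k => g.contains k))
    (hnd : g.keys.Nodup)
    (hpv : ∀ k p v st, (k, (p, v, st)) ∈ g.items → pvFirstPV rows k = some (p, v)) :
    (rows.foldl pvLoopA (c, acc)).2 = acc ++ g.values.map pvEmit := by
  induction rows generalizing c g acc with
  | nil =>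
      have hgi : g.items = [] := by
        have hk : g.keys = [] := by simpa [pvFirstKeys] using hord
        unfold PySem.Dict.keys at hk
        exact List.map_eq_nil_iff.mp hk
      simp [PySem.Dict.values, hgi]
  | cons r rs ih =>
      obtain ⟨s, p, v, rfl⟩ := List.length_eq_three.mp (hlen r List.mem_cons_self)
      have hlen' : ∀ r ∈ rs, r.length = 3 := fun r hr => hlen r (List.mem_cons_of_mem _ hr)
      have hkey : pvKeyOf [s, p, v] = p ++ ":" ++ v := rfl
      have hcg := pvStrip_contains c g hc (p ++ ":" ++ v)
      rw [List.foldl_cons]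
      by_cases hg : g.contains (p ++ ":" ++ v) = true
      · -- the key of this row heads the dict: emit it and recurse on the tail
        have hord1 : g.keys = (p ++ ":" ++ v) ::
            (((pvFirstKeys rs).filter (fun k => k ≠ p ++ ":" ++ v)).filter
              (fun k => g.contains k)) := by
          rw [hord]
          simp [pvFirstKeys, hkey, hg]
        obtain ⟨e, rest, hitems⟩ : ∃ e rest, g.items = e :: rest := by
          cases hgi : g.items with
          | nil =>
              unfold PySem.Dict.keys at hord1
              rw [hgi] at hord1
              simp at hord1
          | cons e rest => exact ⟨e, rest, rfl⟩
        have hkeysg : g.keys = e.1 :: rest.map Prod.fst := by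
          unfold PySem.Dict.keys
          rw [hitems]
          rfl
        have he1 : e.1 = p ++ ":" ++ v := by
          rw [hkeysg] at hord1
          exact (List.cons_eq_cons.mp hord1).1
        have hKrest : (p ++ ":" ++ v) ∉ rest.map Prod.fst := by
          have := hnd
          rw [hkeysg, he1] at this
          exact (List.nodup_cons.mp this).1
        have hget : g.get? (p ++ ":" ++ v) = some e.2 := by
          unfold PySem.Dict.get?
          rw [hitems, List.find?_cons_of_pos (by simp [he1])]
          rfl
        have hcgetD : c.getD (p ++ ":" ++ v) [] = e.2.2.2 := by
          unfold PySem.Dict.getD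
          rw [pvStrip_get? c g hc, hget]
          rfl
        have hccont : c.contains (p ++ ":" ++ v) = true := by rw [hcg, hg]
        have hstep : pvLoopA (c, acc) [s, p, v]
            = (c.erase (p ++ ":" ++ v),
               acc ++ [[PySem.Str.join "+" e.2.2.2, p, v]]) := by
          simp [pvLoopA, pvMakeKey, hccont, hcgetD]
        -- the stored (parameter, value) are this row's, by hpv at the first occurrence
        have hpv0 := hpv e.1 e.2.1 e.2.2.1 e.2.2.2 (by rw [hitems]; exact List.mem_cons_self)
        have hpe : e.2.1 = p ∧ e.2.2.1 = v := by
          rw [he1] at hpv0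
          simp [pvFirstPV, hkey] at hpv0
          exact ⟨hpv0.1.symm, hpv0.2.symm⟩
        -- erased dict matches the tail of g
        have herase : (c.erase (p ++ ":" ++ v)).items = pvStrip rest := by
          show c.items.filter _ = pvStrip rest
          rw [hc]
          unfold pvStrip
          rw [List.filter_map]
          have : (rest.filter (fun q => !(q.1 == (p ++ ":" ++ v)))) = rest := by
            apply List.filter_eq_self.mpr
            intro q hq
            simp only [Bool.not_eq_eq_eq_not, Bool.not_true, beq_eq_false_iff_ne, ne_eq]
            intro hqe
            exact hKrest (List.mem_map.mpr ⟨q, hq, hqe⟩)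
          rw [hitems]
          show ((e :: rest).filter (fun q => !(q.1 == (p ++ ":" ++ v)))).map _ = _
          rw [List.filter_cons_of_neg (by simp [he1]), this]
        have hcontrest : ∀ x, (PySem.Dict.mk rest).contains x
            = ((g.contains x) && !(x = p ++ ":" ++ v)) := by
          intro x
          by_cases hx : x = p ++ ":" ++ v
          · have h0 : (PySem.Dict.mk rest).contains x = false := by
              unfold PySem.Dict.contains
              apply List.any_eq_false.mpr
              intro q hq hqx
              exact hKrest (List.mem_map.mpr ⟨q, hq, (beq_iff_eq.mp hqx).trans hx⟩)
            rw [h0, hx]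
            simp
          · have : g.contains x = (PySem.Dict.mk rest).contains x := by
              unfold PySem.Dict.contains
              rw [hitems]
              simp only [List.any_cons]
              have : (e.1 == x) = false := by
                rw [he1]
                exact beq_eq_false_iff_ne.mpr (fun hh => hx (hh.symm))
              simp [this]
            simp [hx, this]
        have hord2 : (PySem.Dict.mk rest).keys
            = (pvFirstKeys rs).filter (fun k => (PySem.Dict.mk rest).contains k) := by
          have htail : rest.map Prod.fst
              = ((pvFirstKeys rs).filter (fun k => k ≠ p ++ ":" ++ v)).filter
                  (fun k => g.contains k) := by
            rw [hkeysg] at hord1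
            exact (List.cons_eq_cons.mp hord1).2
          show rest.map Prod.fst = _
          rw [htail, List.filter_filter]
          apply List.filter_congr
          intro x _
          rw [hcontrest x]
          by_cases hx : x = p ++ ":" ++ v
          · simp [hx]
          · simp [hx]
        have hnd2 : (PySem.Dict.mk rest).keys.Nodup := by
          have := hnd
          rw [hkeysg] at this
          exact (List.nodup_cons.mp this).2
        have hpv2 : ∀ k p' v' st, (k, (p', v', st)) ∈ (PySem.Dict.mk rest).items →
            pvFirstPV rs k = some (p', v') := by
          intro k p' v' st hm
          have hkK : k ≠ p ++ ":" ++ v := by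
            intro hh
            exact hKrest (List.mem_map.mpr ⟨(k, (p', v', st)), hm, hh⟩)
          have hne : ¬ (pvKeyOf [s, p, v] = k) := by
            rw [hkey]
            exact fun hh => hkK hh.symm
          have := hpv k p' v' st (by rw [hitems]; exact List.mem_cons_of_mem _ hm)
          rw [show pvFirstPV ([s, p, v] :: rs) k = pvFirstPV rs k from by
            simp [pvFirstPV, hne]] at this
          exact this
        rw [hstep, ih _ _ _ hlen' (by rw [herase]) hord2 hnd2 hpv2]
        have hvals : g.values = e.2 :: rest.map Prod.snd := by
          unfold PySem.Dict.values
          rw [hitems]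
          rfl
        rw [hvals]
        simp [pvEmit, hpe.1, hpe.2]
      · -- key no longer present: A skips the row; it contributes nothing
        have hccont : c.contains (p ++ ":" ++ v) = false := by
          rw [hcg]; simpa using hg
        have hstep : pvLoopA (c, acc) [s, p, v] = (c, acc) := by
          simp [pvLoopA, pvMakeKey, hccont]
        have hord2 : g.keys = (pvFirstKeys rs).filter (fun k => g.contains k) := by
          rw [hord]
          simp only [pvFirstKeys, hkey, List.filter_cons]
          rw [if_neg (by simpa using hg), List.filter_filter]
          apply List.filter_congr
          intro x _
          by_cases hx : x = p ++ ":" ++ v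
          · subst hx
            simp [show g.contains (p ++ ":" ++ v) = false from by simpa using hg]
          · simp [hx]
        have hpv2 : ∀ k p' v' st, (k, (p', v', st)) ∈ g.items →
            pvFirstPV rs k = some (p', v') := by
          intro k p' v' st hm
          have hck : g.contains k = true := by
            unfold PySem.Dict.contains
            exact List.any_eq_true.mpr ⟨_, hm, by simp⟩
          have hkK : k ≠ p ++ ":" ++ v := by
            intro hh
            rw [hh] at hck
            rw [hck] at hg
            exact hg rfl
          have hne : ¬ (pvKeyOf [s, p, v] = k) := by
            rw [hkey]
            exact fun hh => hkK hh.symm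
          have := hpv k p' v' st hm
          rw [show pvFirstPV ([s, p, v] :: rs) k = pvFirstPV rs k from by
            simp [pvFirstPV, hne]] at this
          exact this
        rw [hstep, ih _ _ _ hlen' hc hord2 hnd hpv2]

-- ===== VERDICT (by name: the statement is the Claim_ definition above) =====
theorem compact_parameter_list_spec : Claim_equal_compact_parameter_list := by
  intro parameters _hdom hpre
  unfold Spec_compact_parameter_list compact_parameter_list compact_parameter_list_alt
  show (parameters.foldl pvLoopA (parameters.foldl pvGroupA PySem.Dict.empty, [])).2
      = (parameters.foldl pvGroupB PySem.Dict.empty).values.map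
          (fun t => [PySem.Str.join "+" t.2.2, t.1, t.2.1])
  have hkeys' : (parameters.foldl pvGroupB PySem.Dict.empty).keys = pvFirstKeys parameters := by
    rw [pvGroupB_keys parameters PySem.Dict.empty hpre]
    simp [PySem.Dict.contains_empty, PySem.Dict.keys_empty]
  have hnd : (parameters.foldl pvGroupB PySem.Dict.empty).keys.Nodup :=
    hkeys' ▸ pvFirstKeys_nodup parameters
  have hord : (parameters.foldl pvGroupB PySem.Dict.empty).keys
      = (pvFirstKeys parameters).filter
          (fun k => (parameters.foldl pvGroupB PySem.Dict.empty).contains k) := by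
    conv_lhs => rw [hkeys']
    symm
    apply List.filter_eq_self.mpr
    intro x hx
    have hxk : x ∈ (parameters.foldl pvGroupB PySem.Dict.empty).keys := hkeys' ▸ hx
    exact (PySem.Dict.contains_iff_mem_keys _ _).mpr hxk
  have hpv : ∀ k p v st,
      (k, (p, v, st)) ∈ (parameters.foldl pvGroupB PySem.Dict.empty).items →
      pvFirstPV parameters k = some (p, v) := by
    intro k p v st hm
    rcases pvGroupB_pv parameters _ hpre k p v st hm with ⟨st', h⟩ | ⟨_, h⟩
    · simp [PySem.Dict.empty] at h
    · exact h
  have hmain := pvLoopA_eq parameters _ _ [] hpre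
    (pvGroupAB_items parameters _ _ hpre rfl) hord hnd hpv
  simpa [pvEmit] using hmain
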